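-- pv_equiv track=rewrite | github.com/Skarlett/CharSub | charsub/patterns.py | replace_exact
-- ===== SOURCE A (Python) =====
-- def replace_exact(word, position, new):
--   '''
--   Replaces exact charcter on position
--
--   :param: word: string to manipulate
--     :type: str
--
--   :param: position: exact character spot to replace
--     :type int
--
--   :param: new: string to replace to with
--     :type: str
--
--   :return: newword: manipulated result
--     :type: str
--   '''
--   newword = ''
--   for i, x in enumerate(word):
--     if i == position:
--       newword += new
--     else:
--       newword += x
--   return newword
-- ===== SOURCE B (Python) =====
-- def replace_exact(word, position, new):
--   if 0 <= position < len(word):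
--     return word[:position] + new + word[position+1:]
--   return word
-- ===== Notes on version B (the rewrite author's own statement) =====
-- stated objective: faster
-- what changed: Replaces the character-by-character enumerate/accumulate loop with a single bounds-checked slice expression word[:p] + new + word[p+1:], returning word unchanged when p is out of range (matching A's no-op there).
import Mathlib
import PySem

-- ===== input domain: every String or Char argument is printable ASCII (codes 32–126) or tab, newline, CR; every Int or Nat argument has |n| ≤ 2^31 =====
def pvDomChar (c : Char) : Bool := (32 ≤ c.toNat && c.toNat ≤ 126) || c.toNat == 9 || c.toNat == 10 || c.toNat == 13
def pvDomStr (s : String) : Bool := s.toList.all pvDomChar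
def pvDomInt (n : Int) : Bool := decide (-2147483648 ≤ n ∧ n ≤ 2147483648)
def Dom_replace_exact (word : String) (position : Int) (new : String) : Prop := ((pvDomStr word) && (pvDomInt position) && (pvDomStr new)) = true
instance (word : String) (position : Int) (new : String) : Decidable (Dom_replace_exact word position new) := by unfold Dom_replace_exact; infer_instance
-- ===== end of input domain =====

-- B replaces A's enumerate-and-accumulate loop with one bounds-checked slice expression (simpler; return value only).

-- ===== PORT A =====
-- A: newword = ''; for i, x in enumerate(word): newword += new if i == position else x
def replace_exact (word : String) (position : Int) (new : String) : String :=
  String.ofList ((PySem.List.enumerate word.toList 0).foldl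
    (fun newword ix => if ix.1 == position then newword ++ new.toList else newword ++ [ix.2]) [])

-- ===== PORT B =====
-- B: word[:position] + new + word[position+1:] when 0 <= position < len(word), else word
def replace_exact_alt (word : String) (position : Int) (new : String) : String :=
  if 0 ≤ position ∧ position < (word.toList.length : Int) then
    String.ofList (PySem.List.slice word.toList none (some position) ++ new.toList ++
               PySem.List.slice word.toList (some (position + 1)) none)
  else word

-- ===== PRECONDITION & SPEC =====
def Spec_replace_exact (word : String) (position : Int) (new : String) (out : String) : Prop := out = replace_exact_alt word position new
instance (word : String) (position : Int) (new : String) (out : String) : Decidable (Spec_replace_exact word position new out) := by unfold Spec_replace_exact; infer_instance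

-- ===== CLAIM (what is proved, stated in full; the proofs are below) =====
def Claim_equal_replace_exact : Prop := ∀ (word : String) (position : Int) (new : String), Dom_replace_exact word position new → Spec_replace_exact word position new (replace_exact word position new)

-- ===== LEMMAS AND PROOFS =====

/-- Loop invariant for A: folding over `enumerate xs s` appends either the
spliced list (when `position` indexes into this segment) or `xs` unchanged. -/
theorem replace_foldl_enumerate (new' : List Char) (position : Int) :
    ∀ (xs : List Char) (s : Int) (acc : List Char),
    (PySem.List.enumerate xs s).foldl
      (fun newword ix => if ix.1 == position then newword ++ new' else newword ++ [ix.2]) acc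
    = acc ++ (if s ≤ position ∧ position < s + xs.length then
        xs.take (position - s).toNat ++ new' ++ xs.drop ((position - s).toNat + 1)
      else xs) := by
  intro xs
  induction xs with
  | nil =>
    intro s acc
    simp [PySem.List.enumerate]
  | cons x xs ih =>
    intro s acc
    rw [PySem.List.enumerate_cons]
    simp only [List.foldl_cons]
    by_cases hp : s = position
    · subst hp
      simp only [beq_self_eq_true, if_true]
      rw [ih]
      have h1 : ¬ (s + 1 ≤ s ∧ s < s + 1 + (xs.length : Int)) := by omega
      have h2 : s ≤ s ∧ s < s + ((x :: xs).length : Int) := by simp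
      rw [if_neg h1, if_pos h2]
      simp
    · have hne : (s == position) = false := by simp [hp]
      simp only [hne, Bool.false_eq_true, if_false]
      rw [ih]
      by_cases hc : s + 1 ≤ position ∧ position < s + 1 + (xs.length : Int)
      · have hc' : s ≤ position ∧ position < s + ((x :: xs).length : Int) := by
          simp only [List.length_cons]; push_cast; omega
        rw [if_pos hc, if_pos hc']
        have hk : (position - s).toNat = (position - (s + 1)).toNat + 1 := by omega
        simp [hk, List.take_succ_cons, List.drop_succ_cons]
      · have hc' : ¬ (s ≤ position ∧ position < s + ((x :: xs).length : Int)) := by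
          simp only [List.length_cons] at hc ⊢; push_cast at hc ⊢; omega
        rw [if_neg hc, if_neg hc']
        simp
    
-- ===== VERDICT (by name: the statement is the Claim_ definition above) =====
theorem replace_exact_spec : Claim_equal_replace_exact := by
  intro word position new _
  unfold Spec_replace_exact replace_exact replace_exact_alt
  rw [replace_foldl_enumerate]
  by_cases h : 0 ≤ position ∧ position < (word.toList.length : Int)
  · have h0 : (0 : Int) ≤ position ∧ position < 0 + (word.toList.length : Int) := by omega
    rw [if_pos h0, if_pos h]
    have hpos : position = ((position.toNat : Nat) : Int) := by omega
    rw [hpos, PySem.List.slice_to_natCast]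
    have : ((position.toNat : Int) + 1) = (((position.toNat + 1 : Nat) : Nat) : Int) := by push_cast; ring
    rw [this, PySem.List.slice_from_natCast]
    have hm : max position 0 = position := by omega
    simp [hm]
  · have h0 : ¬ ((0 : Int) ≤ position ∧ position < 0 + (word.toList.length : Int)) := by omega
    rw [if_neg h0, if_neg h]
    exact String.ofList_toList
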